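-- pv_equiv track=rewrite | github.com/plturrell/a2a-sap-network | backend/app/a2a/agents/reasoningAgent/enhancedReasoningSkills.py | _infer_processes
-- ===== SOURCE A (Python) =====
-- from typing import Dict, List, Optional, Any, Tuple, Union, Set
--
-- def _infer_processes(concept: str, context: Dict[str, Any]) -> List[str]:
--     """Infer possible processes related to a concept"""
--     processes = []
--
--     if any(term in concept for term in ["system", "network", "structure"]):
--         processes = ["initialization", "operation", "optimization", "maintenance"]
--     elif any(term in concept for term in ["data", "information", "knowledge"]):
--         processes = ["collection", "processing", "analysis", "storage"]
--     elif any(term in concept for term in ["problem", "issue", "challenge"]):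
--         processes = ["identification", "analysis", "solution_design", "implementation"]
--     elif any(term in concept for term in ["model", "algorithm", "method"]):
--         processes = ["design", "implementation", "testing", "refinement"]
--     else:
--         processes = ["development", "implementation", "evaluation", "improvement"]
--
--     return processes
-- ===== SOURCE B (Python) =====
-- # B: min-category scan — map every keyword to a category rank, take the minimum
-- # rank among keywords occurring in the concept, and index a process table.
-- KEYWORD_CATEGORY = {
--     "system": 0, "network": 0, "structure": 0,
--     "data": 1, "information": 1, "knowledge": 1,
--     "problem": 2, "issue": 2, "challenge": 2,
--     "model": 3, "algorithm": 3, "method": 3,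
-- }
--
-- PROCESS_TABLE = [
--     ["initialization", "operation", "optimization", "maintenance"],
--     ["collection", "processing", "analysis", "storage"],
--     ["identification", "analysis", "solution_design", "implementation"],
--     ["design", "implementation", "testing", "refinement"],
--     ["development", "implementation", "evaluation", "improvement"],  # default
-- ]
--
--
-- def _infer_processes(concept, context):
--     """Infer possible processes related to a concept"""
--     best = min((cat for kw, cat in KEYWORD_CATEGORY.items() if kw in concept),
--                default=len(PROCESS_TABLE) - 1)
--     return PROCESS_TABLE[best]
-- ===== Notes on version B (the rewrite author's own statement) =====
-- stated objective: alternative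
-- what changed: Replaced the ordered if/elif cascade by a min-category scan: every keyword is mapped to a numeric category rank, B takes the minimum rank among keywords occurring in the concept (default = last rank) and indexes one flat process table.
import Mathlib
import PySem

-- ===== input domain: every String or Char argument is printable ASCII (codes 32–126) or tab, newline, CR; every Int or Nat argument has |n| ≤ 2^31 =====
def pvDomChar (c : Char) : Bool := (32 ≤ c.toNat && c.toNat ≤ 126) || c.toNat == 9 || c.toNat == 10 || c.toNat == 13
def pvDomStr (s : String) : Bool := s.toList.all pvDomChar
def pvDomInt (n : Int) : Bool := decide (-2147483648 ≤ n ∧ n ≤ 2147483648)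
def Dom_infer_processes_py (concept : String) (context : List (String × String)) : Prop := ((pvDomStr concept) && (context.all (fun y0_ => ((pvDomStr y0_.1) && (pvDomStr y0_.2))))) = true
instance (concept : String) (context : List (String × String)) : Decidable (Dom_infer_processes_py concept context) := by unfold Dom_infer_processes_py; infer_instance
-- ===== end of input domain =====

-- B replaces A's ordered if/elif cascade by a min-category scan over a keyword→rank map plus a flat process table (alternative).


-- ===== PORT A =====
def infer_processes_py (concept : String) (context : List (String × String)) : List String :=
  if ["system", "network", "structure"].any (fun term => PySem.Str.isIn term concept) then
    ["initialization", "operation", "optimization", "maintenance"]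
  else if ["data", "information", "knowledge"].any (fun term => PySem.Str.isIn term concept) then
    ["collection", "processing", "analysis", "storage"]
  else if ["problem", "issue", "challenge"].any (fun term => PySem.Str.isIn term concept) then
    ["identification", "analysis", "solution_design", "implementation"]
  else if ["model", "algorithm", "method"].any (fun term => PySem.Str.isIn term concept) then
    ["design", "implementation", "testing", "refinement"]
  else
    ["development", "implementation", "evaluation", "improvement"]

-- ===== PORT B =====
-- KEYWORD_CATEGORY: every keyword mapped to its category rank (dict as association list)
def keywordCategory : List (String × Nat) :=
  [ ("system", 0), ("network", 0), ("structure", 0),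
    ("data", 1), ("information", 1), ("knowledge", 1),
    ("problem", 2), ("issue", 2), ("challenge", 2),
    ("model", 3), ("algorithm", 3), ("method", 3) ]

-- PROCESS_TABLE, last entry = default
def processTable : List (List String) :=
  [ ["initialization", "operation", "optimization", "maintenance"],
    ["collection", "processing", "analysis", "storage"],
    ["identification", "analysis", "solution_design", "implementation"],
    ["design", "implementation", "testing", "refinement"],
    ["development", "implementation", "evaluation", "improvement"] ]

-- min over the ranks of keywords occurring in the concept, default = len(PROCESS_TABLE) - 1
def infer_processes_py_alt (concept : String) (context : List (String × String)) : List String :=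
  let best :=
    ((keywordCategory.filter (fun p => PySem.Str.isIn p.1 concept)).map Prod.snd).foldl
      Nat.min (processTable.length - 1)
  processTable.getD best []

-- ===== PRECONDITION & SPEC =====
def Spec_infer_processes_py (concept : String) (context : List (String × String)) (out : List String) : Prop := out = infer_processes_py_alt concept context
instance (concept : String) (context : List (String × String)) (out : List String) : Decidable (Spec_infer_processes_py concept context out) := by unfold Spec_infer_processes_py; infer_instance

-- ===== CLAIM (what is proved, stated in full; the proofs are below) =====
def Claim_equal_infer_processes_py : Prop := ∀ (concept : String) (context : List (String × String)), Dom_infer_processes_py concept context → Spec_infer_processes_py concept context (infer_processes_py concept context)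

-- ===== LEMMAS AND PROOFS =====

-- B's fold over one constant-rank keyword group: min with the rank iff any keyword of the group matches
theorem grpMin (s1 s2 s3 : String) (n : Nat) (c : String) (a : Nat) :
    (([(s1,n),(s2,n),(s3,n)].filter (fun p => PySem.Str.isIn p.1 c)).map Prod.snd).foldl Nat.min a
    = if PySem.Str.isIn s1 c || PySem.Str.isIn s2 c || PySem.Str.isIn s3 c then Nat.min a n else a := by
  simp only [PySem.Str.isIn, List.filter_cons, List.filter_nil]
  rcases (PySem.Chars.isIn s1.toList c.toList).eq_false_or_eq_true with h1 | h1 <;>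
  rcases (PySem.Chars.isIn s2.toList c.toList).eq_false_or_eq_true with h2 | h2 <;>
  rcases (PySem.Chars.isIn s3.toList c.toList).eq_false_or_eq_true with h3 | h3 <;>
    simp [h1, h2, h3]

theorem kcSplit : keywordCategory =
    [("system", 0), ("network", 0), ("structure", 0)] ++
    ([("data", 1), ("information", 1), ("knowledge", 1)] ++
    ([("problem", 2), ("issue", 2), ("challenge", 2)] ++
     [("model", 3), ("algorithm", 3), ("method", 3)])) := rfl

-- ===== VERDICT (by name: the statement is the Claim_ definition above) =====
theorem infer_processes_py_spec : Claim_equal_infer_processes_py := by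
  intro concept context _
  unfold Spec_infer_processes_py infer_processes_py infer_processes_py_alt
  rw [kcSplit]
  simp only [List.filter_append, List.map_append, List.foldl_append, grpMin,
    List.any_cons, List.any_nil, Bool.or_false, processTable]
  rcases (PySem.Str.isIn "system" concept || (PySem.Str.isIn "network" concept || PySem.Str.isIn "structure" concept)).eq_false_or_eq_true with h0 | h0 <;>
  rcases (PySem.Str.isIn "data" concept || (PySem.Str.isIn "information" concept || PySem.Str.isIn "knowledge" concept)).eq_false_or_eq_true with h1 | h1 <;>
  rcases (PySem.Str.isIn "problem" concept || (PySem.Str.isIn "issue" concept || PySem.Str.isIn "challenge" concept)).eq_false_or_eq_true with h2 | h2 <;>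
  rcases (PySem.Str.isIn "model" concept || (PySem.Str.isIn "algorithm" concept || PySem.Str.isIn "method" concept)).eq_false_or_eq_true with h3 | h3 <;>
    simp_all [Bool.or_assoc]
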